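-- pv_equiv track=rewrite | github.com/softwarelikeyou/CS313E | Assignment 1 - Bowling/Bowling.py | makeFrames
-- ===== SOURCE A (Python) =====
-- def makeFrames(game):
--     #   X    9  /    X    9  /    X    9 /    X     9   /    X     9   /    X
--     # [[0], [1, 2], [3], [4, 5], [6], [7, 8], [9], [10, 11], [12], [13, 14, 15]]
--     # [[0], [1, 2], [3], [4, 5], [6], [7, 8], [9], [10, 11], [12], [13, 14, 15]]
--     frames = []
--     frame = []
--     ballcount = 0
--     framecount = 0
--     for index, ball in enumerate(game):
--         if framecount == 9:
--             for k in range(index, len(game)):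
--                 frame.append(k)
--             frames.append(frame)
--             break
--
--         if ball == 'X':
--             frame.append(index)
--             frames.append(frame)
--             framecount += 1
--             frame = []
--             ballcount = 0
--
--         else:
--             frame.append(index)
--             ballcount += 1
--             if (ballcount == 2):
--                 frames.append(frame)
--                 framecount += 1
--                 frame = []
--                 ballcount = 0
--
--     return frames
-- ===== SOURCE B (Python) =====
-- def makeFrames(game):
--     frames = []
--     i = 0
--     for _ in range(9):
--         if i >= len(game):
--             return frames
--         if game[i] == 'X':
--             frames.append([i])
--             i += 1
--         elif i + 1 < len(game):
--             frames.append([i, i + 1])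
--             i += 2
--         else:
--             return frames
--     if i < len(game):
--         frames.append(list(range(i, len(game))))
--     return frames
-- ===== Notes on version B (the rewrite author's own statement) =====
-- stated objective: simpler
-- what changed: Replaces the per-ball scan with ballcount/framecount/partial-frame state by a per-frame loop over the 9 frames that advances an index cursor by 1 (strike) or 2 (open frame) and emits each frame whole, then appends the remaining indices as the tenth frame.
import Mathlib
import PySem

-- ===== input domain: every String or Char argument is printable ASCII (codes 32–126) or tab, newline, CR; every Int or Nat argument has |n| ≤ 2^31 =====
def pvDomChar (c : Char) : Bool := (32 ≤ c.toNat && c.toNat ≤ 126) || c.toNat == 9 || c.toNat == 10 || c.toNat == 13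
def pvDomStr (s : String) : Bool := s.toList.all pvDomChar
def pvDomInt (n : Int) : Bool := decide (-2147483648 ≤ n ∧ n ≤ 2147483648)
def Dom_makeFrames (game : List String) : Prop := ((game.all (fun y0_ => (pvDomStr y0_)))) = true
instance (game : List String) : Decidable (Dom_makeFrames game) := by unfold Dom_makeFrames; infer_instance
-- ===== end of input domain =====

-- B replaces A's per-ball scan with counters by a per-frame cursor loop (simpler decomposition, same O(n) cost).

-- ===== PORT A =====
-- A's for-loop over enumerate(game) with state (frames, frame, ballcount, framecount); break = returning the result.
def makeFramesLoop (game : List String) : List String → Int → List (List Int) → List Int → Int → Int → List (List Int)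
  | [], _, frames, _, _, _ => frames
  | ball :: rest, index, frames, frame, ballcount, framecount =>
    if framecount == 9 then
      frames ++ [frame ++ PySem.List.pyRange index (game.length : Int) 1]
    else if ball == "X" then
      makeFramesLoop game rest (index + 1) (frames ++ [frame ++ [index]]) [] 0 (framecount + 1)
    else
      if ballcount + 1 == 2 then
        makeFramesLoop game rest (index + 1) (frames ++ [frame ++ [index]]) [] 0 (framecount + 1)
      else
        makeFramesLoop game rest (index + 1) frames (frame ++ [index]) (ballcount + 1) framecount

def makeFrames (game : List String) : List (List Int) :=
  makeFramesLoop game game 0 [] [] 0 0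

-- ===== PORT B =====
-- B's 'for _ in range(9)' loop with cursor i; n counts remaining frame iterations.
def makeFramesAltLoop (game : List String) : Nat → Int → List (List Int) → List (List Int)
  | 0, i, frames =>
      if i < (game.length : Int) then frames ++ [PySem.List.pyRange i (game.length : Int) 1] else frames
  | n + 1, i, frames =>
      if (game.length : Int) ≤ i then frames
      else
        match PySem.List.pyGet? game i with
        | none => frames   -- unreachable: here 0 ≤ i < len(game), mirrors game[i]
        | some ball =>
          if ball == "X" then makeFramesAltLoop game n (i + 1) (frames ++ [[i]])
          else if i + 1 < (game.length : Int) then makeFramesAltLoop game n (i + 2) (frames ++ [[i, i + 1]])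
          else frames

def makeFrames_alt (game : List String) : List (List Int) :=
  makeFramesAltLoop game 9 0 []

-- ===== PRECONDITION & SPEC =====
def Spec_makeFrames (game : List String) (out : List (List Int)) : Prop := out = makeFrames_alt game
instance (game : List String) (out : List (List Int)) : Decidable (Spec_makeFrames game out) := by unfold Spec_makeFrames; infer_instance

-- ===== CLAIM (what is proved, stated in full; the proofs are below) =====
def Claim_equal_makeFrames : Prop := ∀ (game : List String), Dom_makeFrames game → Spec_makeFrames game (makeFrames game)

-- ===== LEMMAS AND PROOFS =====

-- B's loop returns its accumulator as soon as the cursor is past the end.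
lemma altLoop_out (game : List String) (n : Nat) (i : Int) (frames : List (List Int))
    (h : (game.length : Int) ≤ i) : makeFramesAltLoop game n i frames = frames := by
  cases n <;> simp [makeFramesAltLoop, h, not_lt.mpr h]

lemma loops_eq (game : List String) :
    ∀ (m : Nat) (rest : List String) (i : Int) (frames : List (List Int)) (n : Nat),
      rest.length ≤ m → 0 ≤ i → game.drop i.toNat = rest → n ≤ 9 →
      makeFramesLoop game rest i frames [] 0 (9 - (n : Int)) = makeFramesAltLoop game n i frames := by
  intro m
  induction m with
  | zero =>
    intro rest i frames n hm hi hd hn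
    have hr : rest = [] := List.eq_nil_of_length_eq_zero (Nat.le_zero.mp hm)
    subst hr
    have hlen : (game.length : Int) ≤ i := by
      have := List.drop_eq_nil_iff.mp hd
      omega
    rw [makeFramesLoop, altLoop_out game n i frames hlen]
  | succ m ih =>
    intro rest i frames n hm hi hd hn
    cases rest with
    | nil =>
      have hlen : (game.length : Int) ≤ i := by
        have := List.drop_eq_nil_iff.mp hd
        omega
      rw [makeFramesLoop, altLoop_out game n i frames hlen]
    | cons ball rest' =>
      have hlt : i.toNat < game.length := by
        by_contra hc
        push Not at hc
        rw [List.drop_eq_nil_iff.mpr hc] at hd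
        cases hd
      have hget : game[i.toNat]? = some ball := by
        have h0 : (game.drop i.toNat)[0]? = game[i.toNat + 0]? := List.getElem?_drop
        rw [hd] at h0
        simpa using h0.symm
      have hpg : PySem.List.pyGet? game i = some ball := by
        rw [PySem.List.pyGet?_of_nonneg game hi, hget]
      have hdrop' : game.drop (i.toNat + 1) = rest' := by
        have h1 : game.drop (i.toNat + 1) = (game.drop i.toNat).drop 1 := by
          rw [List.drop_drop]
        rw [h1, hd, List.drop_one, List.tail_cons]
      have hilen : i < (game.length : Int) := by omega
      cases n with
      | zero =>
        rw [makeFramesLoop, makeFramesAltLoop]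
        norm_num [hilen]
      | succ n' =>
        have hfc : (((9 : Int) - ((n' + 1 : Nat) : Int)) == 9) = false := by
          simp only [beq_eq_false_iff_ne, ne_eq]
          push_cast
          omega
        have hcast : (9 : Int) - ((n' + 1 : Nat) : Int) + 1 = 9 - (n' : Int) := by push_cast; omega
        rw [makeFramesLoop, makeFramesAltLoop]
        simp only [hfc, Bool.false_eq_true, if_false, if_neg (not_le.mpr hilen), hpg]
        by_cases hX : ball = "X"
        · subst hX
          have key := ih rest' (i + 1) (frames ++ [[i]]) n'
            (by simpa using Nat.le_of_succ_le_succ hm) (by omega)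
            (by rw [show (i + 1).toNat = i.toNat + 1 by omega, hdrop']) (by omega)
          simpa [hcast, show (9 : Int) - ((n' : Int) + 1) + 1 = 9 - (n' : Int) from by ring] using key
        · have hXb : (ball == "X") = false := by simpa using hX
          simp only [hXb, Bool.false_eq_true, if_false,
            show (((0 : Int) + 1) == 2) = false from by decide]
          cases rest' with
          | nil =>
            have hlen2 : game.length ≤ i.toNat + 1 := List.drop_eq_nil_iff.mp hdrop'
            have h2 : ¬ (i + 1 < (game.length : Int)) := by omega
            rw [makeFramesLoop, if_neg h2]
          | cons b2 rest'' =>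
            have hlt2 : i.toNat + 1 < game.length := by
              by_contra hc
              push Not at hc
              rw [List.drop_eq_nil_iff.mpr hc] at hdrop'
              cases hdrop'
            have hdrop'' : game.drop (i.toNat + 2) = rest'' := by
              have h1 : game.drop (i.toNat + 2) = (game.drop (i.toNat + 1)).drop 1 := by
                rw [List.drop_drop]
              rw [h1, hdrop', List.drop_one, List.tail_cons]
            have h2 : i + 1 < (game.length : Int) := by omega
            have key := ih rest'' (i + 2) (frames ++ [[i, i + 1]]) n'
              (by simp at hm; omega) (by omega)
              (by rw [show (i + 2).toNat = i.toNat + 2 by omega, hdrop'']) (by omega)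
            rw [makeFramesLoop, if_pos h2]
            simp only [hfc, Bool.false_eq_true, if_false]
            by_cases hX2 : b2 = "X"
            · subst hX2
              simpa [hcast, show (9 : Int) - ((n' : Int) + 1) + 1 = 9 - (n' : Int) from by ring, show i + 1 + 1 = i + 2 from by ring] using key
            · have hX2b : (b2 == "X") = false := by simpa using hX2
              simp only [hX2b, Bool.false_eq_true, if_false,
                show (((0 : Int) + 1 + 1) == 2) = true from by decide, if_true]
              simpa [hcast, show (9 : Int) - ((n' : Int) + 1) + 1 = 9 - (n' : Int) from by ring, show i + 1 + 1 = i + 2 from by ring] using key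

-- ===== VERDICT (by name: the statement is the Claim_ definition above) =====
theorem makeFrames_spec : Claim_equal_makeFrames := by
  intro game _
  show makeFrames game = makeFrames_alt game
  have h := loops_eq game game.length game 0 [] 9 (le_refl _) (by norm_num) (by simp) (le_refl _)
  norm_num at h
  exact h
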